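-- pv_equiv track=rewrite | github.com/Lars-Janssen/BAPC-A | Week 9/A/A.py | centsavings_td
-- ===== SOURCE A (Python) =====
-- def round10(n):
--     if(n % 10 < 5):
--         return n - n % 10
--     else:
--         return n + (10 - n % 10)
--
-- def centsavings_td(items, D):
--     def cost(n, d):
--         # In this nested function, the variables `cumsums`, `memo`, `N` and `items` are available.
--         if memo[n][d] == 10**9:
--             # The code below should be a minimal change to `centsavings_memo`.
--             # YOUR CODE HERE
--             if n == 0:
--                 return 0
--             if d == 0:
--                 return round10(cumsums[n])
--             # Be sure to *set* memo[n][d]!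
--             best = round10(cumsums[-1])
--             for k in range(0,n):
--                 best = min(best, cost(k, d-1) + round10(cumsums[n] - cumsums[k]))
--             memo[n][d] = best
--             return best
--         return memo[n][d]
--
--     N = len(items)
--     cumsums = [0 for _ in range(N+1)]
--     # Fill the cumsums list.
--     # YOUR CODE HERE
--     for k in range(0,N+1):
--         cumsums[k] = sum(items[:k])
--     assert cumsums[-1] == sum(items), "Did you fill the `cumsums` list until its final index?"
--     memo = [[10**9 for _ in range(D+1)] for _ in range(N+1)]
--     return cost(N, D)
-- ===== SOURCE B (Python) =====
-- def round10(n):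
--     r = n % 10
--     return n - r if r < 5 else n + (10 - r)
--
-- def centsavings_td(items, D):
--     # bottom-up DP over one rolling layer; the recurrence stabilizes after N steps,
--     # so only min(D, N) layers are ever needed
--     c = [0]
--     for x in items:
--         c.append(c[-1] + x)
--     N = len(items)
--     layer = [0 if n == 0 else round10(c[n]) for n in range(N + 1)]
--     tot = round10(c[N])
--     for _ in range(min(D, N)):
--         layer = [0 if n == 0 else min([tot] + [layer[k] + round10(c[n] - c[k]) for k in range(n)])
--                  for n in range(N + 1)]
--     return layer[N]
-- ===== Notes on version B (the rewrite author's own statement) =====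
-- stated objective: alternative
-- what changed: Replaced the recursive memoized cost(n,d) helper and the quadratic slice-based cumsum fill (sum(items[:k]) per index) with a one-pass prefix-sum accumulation and an explicit bottom-up DP over a single rolling layer, iterated only min(D, N) times (a proved stabilization of the recurrence); Pre_ excludes D < 0, where A raises IndexError indexing its empty memo rows.
import Mathlib
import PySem

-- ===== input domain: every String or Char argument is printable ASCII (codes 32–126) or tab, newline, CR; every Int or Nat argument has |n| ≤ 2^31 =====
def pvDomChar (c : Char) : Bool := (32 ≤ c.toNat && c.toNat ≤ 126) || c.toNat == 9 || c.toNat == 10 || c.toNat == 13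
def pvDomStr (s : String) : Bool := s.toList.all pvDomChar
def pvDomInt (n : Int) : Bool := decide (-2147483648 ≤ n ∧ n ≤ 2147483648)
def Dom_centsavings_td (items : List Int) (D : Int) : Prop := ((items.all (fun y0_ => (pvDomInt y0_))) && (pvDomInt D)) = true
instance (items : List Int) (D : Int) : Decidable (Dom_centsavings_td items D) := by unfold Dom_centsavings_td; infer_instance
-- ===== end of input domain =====

-- B replaces A's recursive memoized helper and quadratic slice-based cumsum fill by a one-pass
-- prefix-sum list and a bottom-up DP over one rolling layer, iterated only min(D, N) times
-- (the recurrence stabilizes, proved in costP_stab below) — an alternative decomposition.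

-- shared helper: Python round10 (Python % is floored mod, exact via PySem.Int.mod)
def round10 (n : Int) : Int :=
  if PySem.Int.mod n 10 < 5 then n - PySem.Int.mod n 10 else n + (10 - PySem.Int.mod n 10)

-- ===== PORT A =====
-- cost(n, d) with the memo table threaded through; indices n, d are in range whenever
-- Python's are (Pre_ gives D ≥ 0), so plain getD is exact there.
def costA (cumsums : List Int) (n : Nat) (d : Nat) (memo : List (List Int)) : Int × List (List Int) :=
  if (memo.getD n []).getD d ((10:Int)^9) = (10:Int)^9 then
    if n = 0 then (0, memo)
    else if _hd : d = 0 then (round10 (cumsums.getD n 0), memo)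
    else
      let p := (List.range n).foldl
        (fun (acc : Int × List (List Int)) k =>
          let r := costA cumsums k (d-1) acc.2
          (min acc.1 (r.1 + round10 (cumsums.getD n 0 - cumsums.getD k 0)), r.2))
        (round10 (cumsums.getLastD 0), memo)
      (p.1, p.2.set n ((p.2.getD n []).set d p.1))
  else ((memo.getD n []).getD d ((10:Int)^9), memo)
termination_by d
decreasing_by omega

-- cumsums[k] = sum(items[:k]); memo = (N+1)×(D+1) table of 10**9; (D+1).toNat is exact for D ≥ 0 (Pre_)
def centsavings_td (items : List Int) (D : Int) : Int :=
  let N := items.length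
  let cumsums := (List.range (N+1)).map (fun (k : Nat) => (PySem.List.slice items none (some (k:Int))).sum)
  let memo := List.replicate (N+1) (List.replicate (D+1).toNat ((10:Int)^9))
  (costA cumsums N D.toNat memo).1

-- ===== PORT B =====
-- one-pass prefix sums: c = [0]; for x in items: c.append(c[-1] + x)
def altC (items : List Int) : List Int :=
  items.foldl (fun c x => c ++ [PySem.List.pyGetD c (-1) 0 + x]) [(0:Int)]

-- one bottom-up layer: layer[n] = min([tot] + [layer[k] + round10(c[n]-c[k]) for k in range(n)])
def altStep (c : List Int) (N : Nat) (tot : Int) (layer : List Int) : List Int :=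
  (List.range (N+1)).map (fun n =>
    if n = 0 then 0
    else (List.range n).foldl
      (fun b k => min b (layer.getD k 0 + round10 (c.getD n 0 - c.getD k 0))) tot)

def centsavings_td_alt (items : List Int) (D : Int) : Int :=
  let c := altC items
  let N := items.length
  let layer0 := (List.range (N+1)).map (fun n => if n = 0 then 0 else round10 (c.getD n 0))
  let tot := round10 (c.getD N 0)
  ((List.range (min D.toNat N)).foldl (fun layer _ => altStep c N tot layer) layer0).getD N 0

-- ===== PRECONDITION & SPEC =====
-- Pre_ excludes D < 0, on which Python A raises IndexError (memo rows are empty, memo[N][D] fails).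
def Pre_centsavings_td (items : List Int) (D : Int) : Prop := 0 ≤ D
instance (items : List Int) (D : Int) : Decidable (Pre_centsavings_td items D) := by
  unfold Pre_centsavings_td; infer_instance

def pvWitness_centsavings_td : List Int × Int := ([10, 23], 1)

def Spec_centsavings_td (items : List Int) (D : Int) (out : Int) : Prop := out = centsavings_td_alt items D
instance (items : List Int) (D : Int) (out : Int) : Decidable (Spec_centsavings_td items D out) := by
  unfold Spec_centsavings_td; infer_instance

-- ===== CLAIM (what is proved, stated in full; the proofs are below) =====
def Claim_equal_centsavings_td : Prop := ∀ (items : List Int) (D : Int), Dom_centsavings_td items D → Pre_centsavings_td items D → Spec_centsavings_td items D (centsavings_td items D)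


-- ===== LEMMAS AND PROOFS =====

-- the common mathematical recurrence both programs compute
def costP (c : List Int) : Nat → Nat → Int
  | 0, _ => 0
  | n+1, 0 => round10 (c.getD (n+1) 0)
  | n+1, d+1 =>
    (List.range (n+1)).foldl
      (fun b k => min b (costP c k d + round10 (c.getD (n+1) 0 - c.getD k 0)))
      (round10 (c.getLastD 0))
termination_by n d => (d, n)
decreasing_by omega

def MemoInv (c : List Int) (memo : List (List Int)) : Prop :=
  ∀ n d : Nat, (memo.getD n []).getD d ((10:Int)^9) ≠ (10:Int)^9 →
    (memo.getD n []).getD d ((10:Int)^9) = costP c n d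

lemma costP_zero (c : List Int) (d : Nat) : costP c 0 d = 0 := by rw [costP]

lemma costP_base (c : List Int) (n : Nat) : costP c (n+1) 0 = round10 (c.getD (n+1) 0) := by
  rw [costP]

lemma costP_succ (c : List Int) (n d : Nat) : costP c (n+1) (d+1) =
    (List.range (n+1)).foldl
      (fun b k => min b (costP c k d + round10 (c.getD (n+1) 0 - c.getD k 0)))
      (round10 (c.getLastD 0)) := by rw [costP]

lemma getD_set_eq' {α : Type} (l : List α) (i j : Nat) (v dflt : α) :
    (l.set i v).getD j dflt = if j = i ∧ i < l.length then v else l.getD j dflt := by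
  simp only [List.getD_eq_getElem?_getD, List.getElem?_set]
  split_ifs <;> simp_all

lemma getD_map_range' (f : Nat → Int) (m k : Nat) (h : k < m) (dflt : Int) :
    ((List.range m).map f).getD k dflt = f k := by
  simp [List.getD_eq_getElem?_getD, h]

lemma inv_set (v : Int) (c : List Int) (memo : List (List Int)) (n d : Nat)
    (hI : MemoInv c memo) (hv : costP c n d = v) :
    MemoInv c (memo.set n ((memo.getD n []).set d v)) := by
  intro n' d' hne
  rw [getD_set_eq'] at hne ⊢
  by_cases h1 : n' = n ∧ n < memo.length
  · rw [if_pos h1] at hne ⊢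
    rw [getD_set_eq'] at hne ⊢
    by_cases h2 : d' = d ∧ d < (memo.getD n []).length
    · rw [if_pos h2] at hne ⊢
      rw [h1.1, h2.1]; exact hv.symm
    · rw [if_neg h2] at hne ⊢
      rw [h1.1]; exact hI n d' hne
  · rw [if_neg h1] at hne ⊢
    exact hI n' d' hne

lemma costA_correct (c : List Int) :
    ∀ (d n : Nat) (memo : List (List Int)), MemoInv c memo →
      (costA c n d memo).1 = costP c n d ∧ MemoInv c (costA c n d memo).2 := by
  intro d
  induction d with
  | zero =>
    intro n memo hI
    rw [costA]
    by_cases he : (memo.getD n []).getD ((0:Nat)) ((10:Int)^9) = (10:Int)^9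
    · rw [if_pos he]
      by_cases hn : n = 0
      · subst hn; rw [if_pos rfl]; exact ⟨(costP_zero c 0).symm, hI⟩
      · obtain ⟨m, rfl⟩ := Nat.exists_eq_succ_of_ne_zero hn
        simp only [if_neg (Nat.succ_ne_zero m), dif_pos rfl]
        exact ⟨(costP_base c m).symm, hI⟩
    · rw [if_neg he]
      exact ⟨(hI n 0 he), hI⟩
  | succ d ih =>
    intro n memo hI
    rw [costA]
    by_cases he : (memo.getD n []).getD (d+1) ((10:Int)^9) = (10:Int)^9
    · rw [if_pos he]
      by_cases hn : n = 0
      · subst hn; rw [if_pos rfl]; exact ⟨(costP_zero c (d+1)).symm, hI⟩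
      · obtain ⟨m, rfl⟩ := Nat.exists_eq_succ_of_ne_zero hn
        simp only [if_neg (Nat.succ_ne_zero m), dif_neg (Nat.succ_ne_zero d)]
        -- the threaded foldl computes the pure foldl and preserves the invariant
        have key : ∀ (L : List Nat) (b : Int) (mm : List (List Int)), MemoInv c mm →
            (L.foldl (fun (acc : Int × List (List Int)) k =>
                let r := costA c k (d+1-1) acc.2
                (min acc.1 (r.1 + round10 (c.getD (m+1) 0 - c.getD k 0)), r.2)) (b, mm)).1
              = L.foldl (fun b k => min b (costP c k d + round10 (c.getD (m+1) 0 - c.getD k 0))) b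
            ∧ MemoInv c (L.foldl (fun (acc : Int × List (List Int)) k =>
                let r := costA c k (d+1-1) acc.2
                (min acc.1 (r.1 + round10 (c.getD (m+1) 0 - c.getD k 0)), r.2)) (b, mm)).2 := by
          intro L
          induction L with
          | nil => intro b mm hmm; exact ⟨rfl, hmm⟩
          | cons k L ihL =>
            intro b mm hmm
            simp only [List.foldl_cons, Nat.add_sub_cancel]
            obtain ⟨h1, h2⟩ := ih k mm hmm
            rw [h1]
            exact ihL _ _ h2
        obtain ⟨h1, h2⟩ := key (List.range (m+1)) (round10 (c.getLastD 0)) memo hI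
        simp only [Nat.add_sub_cancel] at h1 h2 ⊢
        refine ⟨?_, ?_⟩
        · rw [h1, costP_succ]
        · exact inv_set _ c _ (m+1) (d+1) h2 (by rw [costP_succ, ← h1])
    · rw [if_neg he]
      exact ⟨(hI n (d+1) he), hI⟩

-- prefix sums: characterisation of B's foldl
def psums (s : Int) : List Int → List Int
  | [] => []
  | x :: l => (s+x) :: psums (s+x) l

lemma altC_foldl (l : List Int) :
    ∀ (acc : List Int) (s : Int), acc ≠ [] → PySem.List.pyGetD acc (-1) 0 = s →
      l.foldl (fun c x => c ++ [PySem.List.pyGetD c (-1) 0 + x]) acc = acc ++ psums s l := by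
  induction l with
  | nil => intro acc s _ _; simp [psums]
  | cons x l ih =>
    intro acc s hne hlast
    simp only [List.foldl_cons, hlast]
    rw [ih (acc ++ [s + x]) (s + x) (by simp) (PySem.List.pyGetD_neg_one_append_singleton _ _ _)]
    simp [psums]

lemma psums_add (b : Int) (l : List Int) :
    ∀ a : Int, psums (a + b) l = (psums b l).map (a + ·) := by
  induction l generalizing b with
  | nil => intro a; simp [psums]
  | cons x l ih =>
    intro a
    simp only [psums, List.map_cons]
    rw [show a + b + x = a + (b + x) from by ring]
    rw [ih (b + x) a]

lemma map_range_take_sum (l : List Int) :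
    (List.range (l.length+1)).map (fun k => (l.take k).sum) = 0 :: psums 0 l := by
  induction l with
  | nil => simp [psums]
  | cons x l ih =>
    have hr : List.range ((x :: l).length + 1) = 0 :: List.map Nat.succ (List.range (l.length + 1)) :=
      List.range_succ_eq_map (n := (x :: l).length)
    rw [hr]
    simp only [List.map_cons, List.map_map, List.take_zero, List.sum_nil]
    have hcomp : ((fun k => ((x :: l).take k).sum) ∘ Nat.succ)
        = ((fun s => x + s) ∘ (fun k => (l.take k).sum)) := by
      funext k; simp [List.take_succ_cons]
    rw [hcomp, ← List.map_map, ih]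
    have h3 := psums_add 0 l x
    rw [add_zero] at h3
    simp only [List.map_cons, psums, zero_add, add_zero]
    rw [h3]

lemma altC_eq (items : List Int) :
    altC items = (List.range (items.length+1)).map (fun (k : Nat) => (PySem.List.slice items none (some (k:Int))).sum) := by
  have h1 : altC items = [0] ++ psums 0 items :=
    altC_foldl items [0] 0 (by simp) (by decide)
  have h2 : ∀ k : Nat, PySem.List.slice items none (some (k:Int)) = items.take k :=
    fun k => PySem.List.slice_to_natCast items k
  calc altC items = 0 :: psums 0 items := by simpa using h1
    _ = (List.range (items.length+1)).map (fun k => (items.take k).sum) := (map_range_take_sum items).symm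
    _ = _ := by apply List.map_congr_left; intro k _; rw [h2 k]

lemma layer_correct (c : List Int) (N : Nat) (hc : c.length = N + 1) :
    ∀ d : Nat, ∀ n : Nat, n ≤ N →
      (((List.range d).foldl (fun layer _ => altStep c N (round10 (c.getD N 0)) layer)
        ((List.range (N+1)).map (fun n => if n = 0 then 0 else round10 (c.getD n 0))))).getD n 0
        = costP c n d := by
  have htot : c.getD N 0 = c.getLastD 0 := by
    rw [List.getD_eq_getElem?_getD, List.getLastD_eq_getLast?, List.getLast?_eq_getElem?,
      show c.length - 1 = N from by omega]
  intro d
  induction d with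
  | zero =>
    intro n hn
    rw [List.range_zero, List.foldl_nil, getD_map_range' _ _ _ (by omega)]
    rcases n with _ | m
    · rw [if_pos rfl, costP_zero]
    · rw [if_neg (Nat.succ_ne_zero m), costP_base]
  | succ d ihd =>
    intro n hn
    rw [show List.range (d+1) = List.range d ++ [d] from List.range_succ,
      List.foldl_append, List.foldl_cons, List.foldl_nil]
    rw [altStep, getD_map_range' _ _ _ (by omega)]
    rcases n with _ | m
    · rw [if_pos rfl, costP_zero]
    · rw [if_neg (Nat.succ_ne_zero m)]
      rw [costP_succ, ← htot]
      exact PySem.List.foldl_congr_mem _ _ _ _ (fun b k hk => by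
        rw [ihd k (by simp at hk; omega)])

lemma memo_init_inv (c : List Int) (a b : Nat) :
    MemoInv c (List.replicate a (List.replicate b ((10:Int)^9))) := by
  intro n d hne
  exfalso
  apply hne
  simp only [List.getD_eq_getElem?_getD, List.getElem?_replicate]
  split_ifs <;> simp [List.getElem?_replicate] <;> split_ifs <;> simp

-- for d ≥ n the recurrence is saturated: extra layers do not change costP
lemma costP_stab (c : List Int) :
    ∀ d k : Nat, k ≤ d → costP c k d = costP c k k := by
  intro d
  induction d using Nat.strong_induction_on with
  | _ d ih =>
    intro k hk
    rcases k with _ | m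
    · rw [costP_zero, costP_zero]
    · rcases Nat.lt_or_ge (m+1) d with hlt | hge
      · obtain ⟨e, rfl⟩ := Nat.exists_eq_succ_of_ne_zero (by omega : d ≠ 0)
        rw [costP_succ, costP_succ]
        exact PySem.List.foldl_congr_mem _ _ _ _ (fun b j hj => by
          simp only [List.mem_range] at hj
          rw [ih e (by omega) j (by omega), ← ih m (by omega) j (by omega)])
      · have : m + 1 = d := by omega
        rw [this]

-- ===== VERDICT (by name: the statement is the Claim_ definition above) =====
theorem centsavings_td_spec : Claim_equal_centsavings_td := by
  intro items D _ _
  unfold Spec_centsavings_td centsavings_td centsavings_td_alt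
  simp only []
  rw [← altC_eq]
  have hlen : (altC items).length = items.length + 1 := by
    rw [altC_eq]; simp
  rw [(costA_correct (altC items) D.toNat items.length _ (memo_init_inv _ _ _)).1]
  rw [layer_correct (altC items) items.length hlen (min D.toNat items.length) items.length (le_refl _)]
  rcases Nat.le_total D.toNat items.length with h | h
  · rw [Nat.min_eq_left h]
  · rw [Nat.min_eq_right h, costP_stab _ D.toNat items.length h,
      ← costP_stab _ items.length items.length (le_refl _)]
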